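-- pv_equiv track=rewrite | github.com/Millennial-Mind/HD-Wallet-BTC | src/b58.py | b58Check_Addr
-- ===== SOURCE A (Python) =====
-- ALPHABET = "123456789ABCDEFGHJKLMNPQRSTUVWXYZabcdefghijkmnopqrstuvwxyz"
--
-- def b58Check_Addr(payload):
--     version = 0x00
--     sb = ''
--     while (payload > 0):
--         r = payload % 58
--         sb = sb + ALPHABET[r]
--         payload = payload // 58
--     return sb[::-1]
-- ===== SOURCE B (Python) =====
-- ALPHABET = "123456789ABCDEFGHJKLMNPQRSTUVWXYZabcdefghijkmnopqrstuvwxyz"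
--
-- def b58Check_Addr(payload):
--     if payload <= 0:
--         return ''
--     # stage 1: count the digits by growing a power of 58
--     ndigits = 1
--     power = 58
--     while power <= payload:
--         ndigits += 1
--         power *= 58
--     # stage 2: extract each digit positionally, most significant first
--     return ''.join(ALPHABET[(payload // 58 ** i) % 58] for i in range(ndigits - 1, -1, -1))
-- ===== Notes on version B (the rewrite author's own statement) =====
-- stated objective: alternative
-- what changed: Replaces the single divide-accumulate-reverse loop by a two-stage positional algorithm: first a loop growing a power of 58 to count the digits, then each digit is extracted independently as (payload // 58**i) % 58 over a descending range, so no accumulator or reversal exists.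
import Mathlib
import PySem

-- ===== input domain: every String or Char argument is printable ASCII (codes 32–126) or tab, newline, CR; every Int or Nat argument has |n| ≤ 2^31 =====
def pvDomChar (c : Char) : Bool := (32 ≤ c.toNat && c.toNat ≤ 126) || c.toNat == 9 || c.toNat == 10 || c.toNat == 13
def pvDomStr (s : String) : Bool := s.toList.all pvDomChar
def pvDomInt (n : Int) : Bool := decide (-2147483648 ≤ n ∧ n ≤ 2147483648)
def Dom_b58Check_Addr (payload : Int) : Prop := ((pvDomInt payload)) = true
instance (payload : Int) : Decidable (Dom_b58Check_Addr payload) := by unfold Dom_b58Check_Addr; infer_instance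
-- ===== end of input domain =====

-- B replaces A's divide-accumulate-then-reverse loop by a two-stage positional algorithm:
-- count the digits with a growing power of 58, then extract each digit independently as
-- (payload // 58**i) % 58 over a descending range (objective: alternative).

-- the shared ALPHABET constant, as a list of characters
def pvAlphabet : List Char :=
  "123456789ABCDEFGHJKLMNPQRSTUVWXYZabcdefghijkmnopqrstuvwxyz".toList

-- termination measure fact for port A (cited by decreasing_by)
theorem pv_fdiv58_toNat_lt (p : Int) (hp : 0 < p) : (PySem.Int.floordiv p 58).toNat < p.toNat := by
  have h : Int.fdiv p 58 = p / 58 - if 0 ≤ (58:Int) ∨ (58:Int) ∣ p then 0 else 1 := Int.fdiv_eq_ediv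
  simp only [PySem.Int.floordiv]
  simp at h
  omega

-- ===== PORT A =====
-- A's while-loop: sb accumulates digits least-significant first.  ALPHABET[r] is always in
-- range (0 ≤ r < 58 since the divisor is 58 and payload > 0), so pyGetD is exact here.
def pvLoopA (payload : Int) (sb : List Char) : List Char :=
  if payload > 0 then
    pvLoopA (PySem.Int.floordiv payload 58)
      (sb ++ [PySem.List.pyGetD pvAlphabet (PySem.Int.mod payload 58) ' '])
  else sb
termination_by payload.toNat
decreasing_by exact pv_fdiv58_toNat_lt _ (by omega)

-- return sb[::-1]  (s[::-1] is reverse)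
def b58Check_Addr (payload : Int) : String :=
  String.ofList (pvLoopA payload []).reverse

-- ===== PORT B =====
-- stage 1 of Source B: ndigits = 1; power = 58; while power <= payload: ndigits += 1; power *= 58.
-- ndigits and power are nonnegative throughout, carried as Nat; the 0 < power conjunct in the
-- guard only makes the recursion total (the sole entry call has power = 58 > 0).
def pvCountDigits (payload : Int) (ndigits power : Nat) : Nat :=
  if (power : Int) ≤ payload ∧ 0 < power then
    pvCountDigits payload (ndigits + 1) (power * 58)
  else ndigits
termination_by payload.toNat + 1 - power
decreasing_by omega

-- stage 2 of Source B: ''.join(ALPHABET[(payload // 58 ** i) % 58] for i in range(ndigits-1, -1, -1));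
-- every i drawn from the range is ≥ 0, so 58 ** i is 58 ^ i.toNat exactly.
def b58Check_Addr_alt (payload : Int) : String :=
  if payload ≤ 0 then String.ofList []
  else
    String.ofList ((PySem.List.pyRange ((pvCountDigits payload 1 58 : Int) - 1) (-1) (-1)).map
      (fun i => PySem.List.pyGetD pvAlphabet
        (PySem.Int.mod (PySem.Int.floordiv payload ((58 : Int) ^ i.toNat)) 58) ' '))

-- ===== PRECONDITION & SPEC =====
def Spec_b58Check_Addr (payload : Int) (out : String) : Prop := out = b58Check_Addr_alt payload
instance (payload : Int) (out : String) : Decidable (Spec_b58Check_Addr payload out) := by unfold Spec_b58Check_Addr; infer_instance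

-- ===== CLAIM (what is proved, stated in full; the proofs are below) =====
def Claim_equal_b58Check_Addr : Prop := ∀ (payload : Int), Dom_b58Check_Addr payload → Spec_b58Check_Addr payload (b58Check_Addr payload)

-- ===== LEMMAS AND PROOFS =====

-- A's loop only ever appends: its result is the accumulator followed by the run from [].
theorem pvLoopA_acc (p : Int) (sb : List Char) :
    pvLoopA p sb = sb ++ pvLoopA p [] := by
  by_cases hp : p > 0
  · conv_lhs => rw [pvLoopA]
    conv_rhs => rw [pvLoopA]
    simp only [if_pos hp]
    rw [pvLoopA_acc (PySem.Int.floordiv p 58)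
        (sb ++ [PySem.List.pyGetD pvAlphabet (PySem.Int.mod p 58) ' ']),
      pvLoopA_acc (PySem.Int.floordiv p 58)
        ([] ++ [PySem.List.pyGetD pvAlphabet (PySem.Int.mod p 58) ' '])]
    simp
  · conv_lhs => rw [pvLoopA]
    conv_rhs => rw [pvLoopA]
    simp [if_neg hp]
termination_by p.toNat
decreasing_by all_goals exact pv_fdiv58_toNat_lt _ (by omega)

-- floordiv by the positive 58 is Euclidean division
theorem pv_fdiv58 (p : Int) : PySem.Int.floordiv p 58 = p / 58 :=
  PySem.Int.floordiv_eq_ediv_of_pos (by norm_num)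

-- the digit extractor of B, named for the proofs
def pvDigit (p i : Int) : Char :=
  PySem.List.pyGetD pvAlphabet (PySem.Int.mod (PySem.Int.floordiv p ((58:Int) ^ i.toNat)) 58) ' '

-- shifting the digit index by one is dividing the payload by 58
theorem pvDigit_shift (p : Int) (j : Nat) :
    pvDigit p ((j : Int) + 1) = pvDigit (PySem.Int.floordiv p 58) (j : Int) := by
  unfold pvDigit
  rw [pv_fdiv58, PySem.Int.floordiv_eq_ediv_of_pos (b := (58:Int)^((j:Int)).toNat) (by positivity),
     PySem.Int.floordiv_eq_ediv_of_pos (b := (58:Int)^(((j:Int)+1)).toNat) (by positivity)]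
  rw [Int.ediv_ediv_of_nonneg (by norm_num)]
  congr 2
  have h1 : ((j:Int) + 1).toNat = j + 1 := by omega
  have h2 : ((j:Int)).toNat = j := by omega
  rw [h1, h2, pow_succ, mul_comm]

-- accumulator shift for the digit counter
theorem pvCount_acc (p : Int) (c w : Nat) :
    pvCountDigits p (c + 1) w = pvCountDigits p c w + 1 := by
  by_cases h : (w : Int) ≤ p ∧ 0 < w
  · conv_lhs => rw [pvCountDigits, if_pos h]
    conv_rhs => rw [pvCountDigits, if_pos h]
    exact pvCount_acc p (c + 1) (w * 58)
  · conv_lhs => rw [pvCountDigits, if_neg h]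
    conv_rhs => rw [pvCountDigits, if_neg h]
termination_by p.toNat + 1 - w
decreasing_by omega

-- pushing one factor 58 from the power into the payload
theorem pvCount_div (p : Int) (c w : Nat) (hw : 0 < w) :
    pvCountDigits p c (w * 58) = pvCountDigits (PySem.Int.floordiv p 58) c w := by
  have key : ((w * 58 : Nat) : Int) ≤ p ↔ (w : Int) ≤ PySem.Int.floordiv p 58 := by
    rw [pv_fdiv58, Int.le_ediv_iff_mul_le (by norm_num)]
    push_cast; constructor <;> intro h <;> linarith
  by_cases h : (w : Int) ≤ PySem.Int.floordiv p 58
  · conv_lhs => rw [pvCountDigits, if_pos ⟨key.mpr h, by omega⟩]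
    conv_rhs => rw [pvCountDigits, if_pos ⟨h, hw⟩]
    exact pvCount_div p (c + 1) (w * 58) (by omega)
  · rw [pvCountDigits, if_neg (fun hc => h (key.mp hc.1)),
        pvCountDigits, if_neg (fun hc => h hc.1)]
termination_by p.toNat + 1 - w
decreasing_by omega

-- the digit counter never goes below its accumulator
theorem pvCount_le (p : Int) (c w : Nat) : c ≤ pvCountDigits p c w := by
  rw [pvCountDigits]
  split
  · exact le_trans (by omega) (pvCount_le p (c + 1) (w * 58))
  · exact le_refl c
termination_by p.toNat + 1 - w
decreasing_by omega

-- the descending range is the reverse of an ascending one (k ≥ 0)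
theorem pv_range_desc (k : Int) (_hk : 0 ≤ k) :
    PySem.List.pyRange k (-1) (-1) = (PySem.List.pyRange 0 (k + 1) 1).reverse := by
  rw [PySem.List.pyRange_neg_one_eq_reverse]; norm_num

-- B's mapped descending range, reversed, equals A's least-significant-first loop output.
theorem pv_main (p : Int) (hp : 0 < p) :
    ((PySem.List.pyRange ((pvCountDigits p 1 58 : Int) - 1) (-1) (-1)).map (pvDigit p)).reverse
      = pvLoopA p [] := by
  have hcpos : 1 ≤ pvCountDigits p 1 58 := pvCount_le p 1 58
  rw [pv_range_desc _ (by omega), List.map_reverse, List.reverse_reverse]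
  have hsub : (pvCountDigits p 1 58 : Int) - 1 + 1 = (pvCountDigits p 1 58 : Int) := by ring
  rw [hsub]
  -- peel the least significant digit
  rw [PySem.List.pyRange_one_cons (by exact_mod_cast hcpos)]
  conv_rhs => rw [pvLoopA, if_pos hp, pvLoopA_acc]
  simp only [List.map_cons, List.nil_append, List.singleton_append, zero_add]
  congr 1
  · -- heads: digit 0 is payload % 58
    unfold pvDigit
    norm_num [PySem.Int.floordiv, Int.fdiv_one]
  · -- tails
    by_cases h58 : 58 ≤ p
    · -- shift the range down by one and recurse on p // 58
      have hd : 0 < PySem.Int.floordiv p 58 := by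
        rw [pv_fdiv58, show (0:Int) < p / 58 ↔ 1 ≤ p / 58 from by omega,
            Int.le_ediv_iff_mul_le (by norm_num)]
        omega
      have hcount : pvCountDigits (PySem.Int.floordiv p 58) 1 58 + 1 = pvCountDigits p 1 58 := by
        have hdiv := pvCount_div p 1 58 (by norm_num)
        conv_rhs => rw [pvCountDigits, if_pos ⟨by exact_mod_cast h58, by norm_num⟩]
        rw [pvCount_acc p 1 (58 * 58), hdiv]
      rw [← pv_main (PySem.Int.floordiv p 58) hd,
          pv_range_desc _ (by have := pvCount_le (PySem.Int.floordiv p 58) 1 58; omega),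
          List.map_reverse, List.reverse_reverse]
      have hsub2 : (pvCountDigits (PySem.Int.floordiv p 58) 1 58 : Int) - 1 + 1
          = (pvCountDigits (PySem.Int.floordiv p 58) 1 58 : Int) := by ring
      rw [hsub2, ← hcount]
      rw [PySem.List.pyRange_one 1, PySem.List.pyRange_one 0]
      push_cast
      have hlen : ((pvCountDigits (PySem.Int.floordiv p 58) 1 58 : Int) + 1 - 1).toNat
          = ((pvCountDigits (PySem.Int.floordiv p 58) 1 58 : Int) - 0).toNat := by omega
      rw [hlen, List.map_map, List.map_map]
      apply List.map_congr_left
      intro a _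
      simp only [Function.comp_apply, zero_add, add_comm 1 (a : Int)]
      exact pvDigit_shift p a
    · -- 1 ≤ p < 58: the counter is 1 and both tails are empty
      have hc1 : pvCountDigits p 1 58 = 1 := by
        rw [pvCountDigits, if_neg (by push_cast; omega)]
      have hd0 : PySem.Int.floordiv p 58 = 0 := by
        rw [pv_fdiv58]; omega
      rw [hc1, hd0]
      rw [pvLoopA, if_neg (by norm_num)]
      rw [show ((1:Nat):Int) = (1:Int) by norm_num, PySem.List.pyRange_one_eq_nil (by norm_num)]
      simp
termination_by p.toNat
decreasing_by exact pv_fdiv58_toNat_lt _ hp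

-- ===== VERDICT (by name: the statement is the Claim_ definition above) =====
theorem b58Check_Addr_spec : Claim_equal_b58Check_Addr := by
  intro payload _
  unfold Spec_b58Check_Addr b58Check_Addr b58Check_Addr_alt
  by_cases hp : payload ≤ 0
  · rw [if_pos hp, pvLoopA, if_neg (by omega)]
    simp
  · rw [if_neg hp, ← pv_main payload (by omega), List.reverse_reverse]
    rfl
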